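-- pv_equiv track=rewrite | github.com/wilmurillo-ai/Design-Assistant | .skills/openclaw-skills/skills/yangagent/whiteboard-animation/scripts/generate_whiteboard.py | _merge_sorted_indices
-- ===== SOURCE A (Python) =====
-- def _merge_sorted_indices(indices, max_gap):
--     if len(indices) == 0:
--         return []
--
--     spans = []
--     start = int(indices[0])
--     end = int(indices[0])
--     for idx in indices[1:]:
--         idx = int(idx)
--         if idx - end <= max_gap + 1:
--             end = idx
--         else:
--             spans.append((start, end))
--             start = idx
--             end = idx
--     spans.append((start, end))
--     return spans
-- ===== SOURCE B (Python) =====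
-- def _merge_sorted_indices(indices, max_gap):
--     xs = [int(x) for x in indices]
--     if not xs:
--         return []
--     n = len(xs)
--     # pass 1: boundary positions where the gap is too large
--     cuts = [i for i in range(1, n) if xs[i] - xs[i - 1] > max_gap + 1]
--     # pass 2: consecutive boundary pairs delimit the spans
--     bounds = [0] + cuts + [n]
--     return [(xs[a], xs[b - 1]) for a, b in zip(bounds, bounds[1:])]
-- ===== Notes on version B (the rewrite author's own statement) =====
-- stated objective: alternative
-- what changed: B replaces A's single accumulate-and-flush loop carrying (start,end) state by two staged passes: first a pass computing the boundary positions where the gap exceeds max_gap+1, then a pass pairing consecutive boundaries into (first,last) spans.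
import Mathlib
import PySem

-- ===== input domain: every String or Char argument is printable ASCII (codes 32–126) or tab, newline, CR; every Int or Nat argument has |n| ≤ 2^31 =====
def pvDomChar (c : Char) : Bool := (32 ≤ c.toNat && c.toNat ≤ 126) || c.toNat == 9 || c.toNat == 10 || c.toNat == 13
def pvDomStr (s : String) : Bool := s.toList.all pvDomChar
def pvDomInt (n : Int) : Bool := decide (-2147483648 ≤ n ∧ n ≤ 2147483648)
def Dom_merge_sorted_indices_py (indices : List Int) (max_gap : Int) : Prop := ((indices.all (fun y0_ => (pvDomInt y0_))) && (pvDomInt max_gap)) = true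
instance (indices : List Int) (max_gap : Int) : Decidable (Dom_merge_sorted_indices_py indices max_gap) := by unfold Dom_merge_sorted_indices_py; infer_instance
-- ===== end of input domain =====

-- B computes span boundaries in one pass and pairs consecutive boundaries into spans in a second pass, instead of A's accumulate-and-flush state loop; return values are proved equal (alternative decomposition, same cost).


-- ===== PORT A =====
def merge_sorted_indices_py (indices : List Int) (max_gap : Int) : List (Int × Int) :=
  match indices with
  | [] => []
  | x :: rest =>
    let st := rest.foldl
      (fun (st : List (Int × Int) × Int × Int) idx =>
        let (spans, start, en) := st
        if idx - en ≤ max_gap + 1 then (spans, start, idx)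
        else (spans ++ [(start, en)], idx, idx))
      ([], x, x)
    st.1 ++ [(st.2.1, st.2.2)]

-- ===== PORT B =====
-- pass 1 of Source B: the boundary positions i in range(1, n) with xs[i] - xs[i-1] > max_gap + 1
def pvCuts (xs : List Int) (g : Int) : List Nat :=
  (List.range' 1 (xs.length - 1)).filter (fun i => decide (xs.getD i 0 - xs.getD (i - 1) 0 > g + 1))

-- pass 2 of Source B: [(xs[a], xs[b-1]) for a, b in zip(bounds, bounds[1:])]
def pvSpans (xs : List Int) (bs : List Nat) : List (Int × Int) :=
  (bs.zip bs.tail).map (fun p => (xs.getD p.1 0, xs.getD (p.2 - 1) 0))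

def merge_sorted_indices_py_alt (indices : List Int) (max_gap : Int) : List (Int × Int) :=
  match indices with
  | [] => []
  | _ :: _ =>
    pvSpans indices (0 :: (pvCuts indices max_gap ++ [indices.length]))

-- ===== PRECONDITION & SPEC =====
def Spec_merge_sorted_indices_py (indices : List Int) (max_gap : Int) (out : List (Int × Int)) : Prop := out = merge_sorted_indices_py_alt indices max_gap
instance (indices : List Int) (max_gap : Int) (out : List (Int × Int)) : Decidable (Spec_merge_sorted_indices_py indices max_gap out) := by unfold Spec_merge_sorted_indices_py; infer_instance

-- ===== CLAIM (what is proved, stated in full; the proofs are below) =====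
def Claim_equal_merge_sorted_indices_py : Prop := ∀ (indices : List Int) (max_gap : Int), Dom_merge_sorted_indices_py indices max_gap → Spec_merge_sorted_indices_py indices max_gap (merge_sorted_indices_py indices max_gap)

-- ===== LEMMAS AND PROOFS =====

-- H g start prev ys: A's remaining spans with current span open as (start, prev)
def pvH (g start prev : Int) : List Int → List (Int × Int)
  | [] => [(start, prev)]
  | y :: ys => if y - prev ≤ g + 1 then pvH g start y ys else (start, prev) :: pvH g y y ys

theorem pvFoldl_eq_H (g : Int) (ys : List Int) :
    ∀ (spans : List (Int × Int)) (start en : Int),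
    (let st := ys.foldl
      (fun (st : List (Int × Int) × Int × Int) idx =>
        let (spans, start, en) := st
        if idx - en ≤ g + 1 then (spans, start, idx)
        else (spans ++ [(start, en)], idx, idx)) (spans, start, en)
     st.1 ++ [(st.2.1, st.2.2)]) = spans ++ pvH g start en ys := by
  induction ys with
  | nil => intro spans start en; simp [pvH]
  | cons y ys ih =>
    intro spans start en
    simp only [List.foldl_cons, pvH]
    by_cases h : y - en ≤ g + 1
    · simp only [h, if_true]
      exact ih spans start y
    · simp only [h, if_false]
      rw [ih (spans ++ [(start, en)]) y y, List.append_assoc]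
      rfl

-- replace the first component of the head
def pvConsHead (s : Int) : List (Int × Int) → List (Int × Int)
  | [] => []
  | (_, e) :: t => (s, e) :: t

theorem pvSpans_cc (xs : List Int) (a b : Nat) (L : List Nat) :
    pvSpans xs (a :: b :: L) =
      (xs.getD a 0, xs.getD (b - 1) 0) :: pvSpans xs (b :: L) := rfl

-- shifting all bounds by one and prepending an element leaves the span values unchanged
theorem pvSpans_shift (x : Int) (rest : List Int) :
    ∀ (L : List Nat) (c : Nat), (∀ b ∈ L, 1 ≤ b) →
    pvSpans (x :: rest) ((c + 1) :: L.map (· + 1)) = pvSpans rest (c :: L) := by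
  intro L
  induction L with
  | nil => intro c _; rfl
  | cons b L ih =>
    intro c hb
    have hb1 : 1 ≤ b := hb b (List.mem_cons_self ..)
    rw [List.map_cons, pvSpans_cc, pvSpans_cc, ih b (fun a ha => hb a (List.mem_cons_of_mem _ ha))]
    congr 2
    all_goals first
      | exact List.getD_cons_succ ..
      | (have h1 : b + 1 - 1 = (b - 1) + 1 := by omega
         rw [h1, List.getD_cons_succ])

theorem pvCuts_pos (xs : List Int) (g : Int) : ∀ b ∈ pvCuts xs g, 1 ≤ b := by
  intro b hb
  have := List.mem_range'_1.mp (List.mem_of_mem_filter hb)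
  omega

-- the cuts of x :: rest are the (shifted) cuts of rest, plus possibly a cut at position 1
theorem pvCuts_cons (x y : Int) (ys : List Int) (g : Int) :
    pvCuts (x :: y :: ys) g =
      (if y - x > g + 1 then [1] else []) ++ (pvCuts (y :: ys) g).map (· + 1) := by
  unfold pvCuts
  have hlen : (x :: y :: ys).length - 1 = (y :: ys).length := by simp
  have hlen2 : (y :: ys).length = ((y :: ys).length - 1) + 1 := by simp
  rw [hlen, hlen2, List.range'_succ, List.filter_cons]
  have h2 : List.range' 2 ((y :: ys).length - 1) = (List.range' 1 ((y :: ys).length - 1)).map (· + 1) := by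
    rw [List.range'_eq_map_range, List.range'_eq_map_range, List.map_map]
    apply List.map_congr_left
    intro a _; simp; omega
  rw [h2, List.filter_map]
  have hfc : (List.range' 1 ((y :: ys).length - 1)).filter
        ((fun i => decide ((x :: y :: ys).getD i 0 - (x :: y :: ys).getD (i - 1) 0 > g + 1)) ∘ (· + 1)) =
      (List.range' 1 ((y :: ys).length - 1)).filter
        (fun i => decide ((y :: ys).getD i 0 - (y :: ys).getD (i - 1) 0 > g + 1)) := by
    apply List.filter_congr
    intro i hi
    have h1 : 1 ≤ i := by have := List.mem_range'_1.mp hi; omega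
    simp only [Function.comp_apply, List.getD_cons_succ]
    congr 2
    have : i + 1 - 1 = (i - 1) + 1 := by omega
    rw [this, List.getD_cons_succ]
  rw [hfc]
  by_cases h : y - x > g + 1
  · simp only [List.getD_cons_succ, List.getD_cons_zero, Nat.sub_self]
    simp [h]
  · simp only [List.getD_cons_succ, List.getD_cons_zero, Nat.sub_self]
    simp [h]

-- B's output on a nonempty list starts with (first element, _)
theorem pvAlt_shape (x : Int) (ys : List Int) (g : Int) :
    ∃ e t, merge_sorted_indices_py_alt (x :: ys) g = (x, e) :: t := by
  show ∃ e t, pvSpans (x :: ys) (0 :: (pvCuts (x :: ys) g ++ [(x :: ys).length])) = (x, e) :: t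
  rcases hc : pvCuts (x :: ys) g ++ [(x :: ys).length] with _ | ⟨b, L⟩
  · exact absurd hc (by simp)
  · exact ⟨(x :: ys).getD (b - 1) 0, _, rfl⟩

theorem pvAlt_cons_le (x y : Int) (ys : List Int) (g : Int) (h : y - x ≤ g + 1) :
    merge_sorted_indices_py_alt (x :: y :: ys) g =
      pvConsHead x (merge_sorted_indices_py_alt (y :: ys) g) := by
  have hne : ¬ (y - x > g + 1) := by omega
  show pvSpans (x :: y :: ys) (0 :: (pvCuts (x :: y :: ys) g ++ [(x :: y :: ys).length])) = _
  rw [pvCuts_cons x y ys g, if_neg hne, List.nil_append]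
  have hlen : (x :: y :: ys).length = (y :: ys).length + 1 := by simp
  have hmap : (pvCuts (y :: ys) g).map (· + 1) ++ [(y :: ys).length + 1] =
      (pvCuts (y :: ys) g ++ [(y :: ys).length]).map (· + 1) := by simp
  rw [hlen, hmap]
  rcases hc : pvCuts (y :: ys) g ++ [(y :: ys).length] with _ | ⟨b, L⟩
  · exact absurd hc (by simp)
  · have hmem : ∀ a ∈ b :: L, 1 ≤ a := by
      intro a ha
      have : a ∈ pvCuts (y :: ys) g ++ [(y :: ys).length] := by rw [hc]; exact ha
      rcases List.mem_append.mp this with h1 | h1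
      · exact pvCuts_pos _ _ _ h1
      · simp at h1; subst h1; simp
    have halt : merge_sorted_indices_py_alt (y :: ys) g = pvSpans (y :: ys) (0 :: b :: L) := by
      show pvSpans (y :: ys) (0 :: (pvCuts (y :: ys) g ++ [(y :: ys).length])) = _
      rw [hc]
    rw [halt, List.map_cons, pvSpans_cc, pvSpans_cc]
    show (_, _) :: _ = pvConsHead x ((_, _) :: _)
    simp only [pvConsHead]
    have hb1 : 1 ≤ b := hmem b (List.mem_cons_self ..)
    congr 1
    · have h1 : b + 1 - 1 = (b - 1) + 1 := by omega
      rw [h1, List.getD_cons_succ]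
      rfl
    · exact pvSpans_shift x (y :: ys) L b (fun a ha => hmem a (List.mem_cons_of_mem _ ha))

theorem pvAlt_cons_gt (x y : Int) (ys : List Int) (g : Int) (h : ¬ (y - x ≤ g + 1)) :
    merge_sorted_indices_py_alt (x :: y :: ys) g =
      (x, x) :: merge_sorted_indices_py_alt (y :: ys) g := by
  have hgt : y - x > g + 1 := by omega
  show pvSpans (x :: y :: ys) (0 :: (pvCuts (x :: y :: ys) g ++ [(x :: y :: ys).length])) = _
  rw [pvCuts_cons x y ys g, if_pos hgt]
  have hlen : (x :: y :: ys).length = (y :: ys).length + 1 := by simp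
  have hmap : [1] ++ ((pvCuts (y :: ys) g).map (· + 1) ++ [(y :: ys).length + 1]) =
      1 :: (pvCuts (y :: ys) g ++ [(y :: ys).length]).map (· + 1) := by simp
  rw [hlen, List.append_assoc, hmap]
  have hpos : ∀ a ∈ pvCuts (y :: ys) g ++ [(y :: ys).length], 1 ≤ a := by
    intro a ha
    rcases List.mem_append.mp ha with h1 | h1
    · exact pvCuts_pos _ _ _ h1
    · simp at h1; subst h1; simp
  rw [pvSpans_cc]
  have hshift : pvSpans (x :: y :: ys) ((0 + 1) :: (pvCuts (y :: ys) g ++ [(y :: ys).length]).map (· + 1)) =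
      pvSpans (y :: ys) (0 :: (pvCuts (y :: ys) g ++ [(y :: ys).length])) :=
    pvSpans_shift x (y :: ys) _ 0 hpos
  rw [show (1 : Nat) = 0 + 1 from rfl, hshift]
  rfl

theorem pvH_eq_alt (g : Int) (ys : List Int) :
    ∀ (s p : Int), pvH g s p ys = pvConsHead s (merge_sorted_indices_py_alt (p :: ys) g) := by
  induction ys with
  | nil =>
    intro s p
    simp [pvH, merge_sorted_indices_py_alt, pvCuts, pvSpans, pvConsHead]
  | cons y ys ih =>
    intro s p
    simp only [pvH]
    by_cases h : y - p ≤ g + 1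
    · rw [if_pos h, ih s y, pvAlt_cons_le p y ys g h]
      obtain ⟨e, t, he⟩ := pvAlt_shape y ys g
      rw [he]; rfl
    · rw [if_neg h, ih y y, pvAlt_cons_gt p y ys g h]
      obtain ⟨e, t, he⟩ := pvAlt_shape y ys g
      rw [he]; rfl

-- ===== VERDICT (by name: the statement is the Claim_ definition above) =====
theorem merge_sorted_indices_py_spec : Claim_equal_merge_sorted_indices_py := by
  intro indices max_gap _
  unfold Spec_merge_sorted_indices_py
  cases indices with
  | nil => rfl
  | cons x ys =>
    show (let st := ys.foldl _ ([], x, x); st.1 ++ [(st.2.1, st.2.2)]) = _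
    rw [pvFoldl_eq_H max_gap ys [] x x, List.nil_append, pvH_eq_alt max_gap ys x x]
    obtain ⟨e, t, he⟩ := pvAlt_shape x ys max_gap
    rw [he]; rfl
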